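/- GENERATED by tools/mkcompositions.py from design/units.gif.tsv (unit `DGifGetImageHeader.COMPOSITION`) — do not edit.
   THE PROOF of the composition unit `DGifGetImageHeader.COMPOSITION`: the 8 segments of `DGifGetImageHeader` chain into its contract, by the theorem
   `Gif.Spec.DGifGetImageHeader.compose` (proved next to the cut assertions). -/
import Gif.Spec.Units.DGifGetImageHeader_COMPOSITION

/-- The segments of `DGifGetImageHeader` compose into its contract. -/
theorem Gif.Spec.Proved.DGifGetImageHeader_COMPOSITION_ok : Gif.Spec.DGifGetImageHeader_COMPOSITION.Statement := by
  intro Lay _hLay μ _hμ u₀ h_DGifGetImageHeader_P h_DGifGetImageHeader_1 h_DGifGetImageHeader_2 h_DGifGetImageHeader_3 h_DGifGetImageHeader_4 h_DGifGetImageHeader_5 h_DGifGetImageHeader_6 h_DGifGetImageHeader_E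
  apply Gif.Spec.DGifGetImageHeader.compose
  all_goals assumption
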